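-- pv_equiv track=rewrite | github.com/huacchob/useful_jobs | utilities/acl_to_yaml.py | is_wildcard_invertable
-- ===== SOURCE A (Python) =====
-- def is_wildcard_invertable(mask: str) -> bool:
--     """
--     Checks if the wildcard mask can be inverted to a netmask.
--
--     Args:
--         mask (str): Wildcard mask.
--
--     Returns:
--         bool: True if the wildcard mask can be inverted to netmask.
--     """
--     mask_split: list[str] = mask.split(sep=".")
--
--     last_zero = False
--     invertible = True
--     for octet in mask_split:
--         if octet != "0" and not last_zero:
--             last_zero = True
--         if octet == "0" and last_zero:
--             invertible = False
--             break
--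
--     return invertible
-- ===== SOURCE B (Python) =====
-- def is_wildcard_invertable(mask: str) -> bool:
--     flags = [octet != "0" for octet in mask.split(sep=".")]
--     return flags == sorted(flags)
-- ===== Notes on version B (the rewrite author's own statement) =====
-- stated objective: simpler
-- what changed: Replaces the stateful single-pass loop with early break by mapping each octet to a boolean flag (octet != "0") and checking the flag list is already sorted (all False then all True).
import Mathlib
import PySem

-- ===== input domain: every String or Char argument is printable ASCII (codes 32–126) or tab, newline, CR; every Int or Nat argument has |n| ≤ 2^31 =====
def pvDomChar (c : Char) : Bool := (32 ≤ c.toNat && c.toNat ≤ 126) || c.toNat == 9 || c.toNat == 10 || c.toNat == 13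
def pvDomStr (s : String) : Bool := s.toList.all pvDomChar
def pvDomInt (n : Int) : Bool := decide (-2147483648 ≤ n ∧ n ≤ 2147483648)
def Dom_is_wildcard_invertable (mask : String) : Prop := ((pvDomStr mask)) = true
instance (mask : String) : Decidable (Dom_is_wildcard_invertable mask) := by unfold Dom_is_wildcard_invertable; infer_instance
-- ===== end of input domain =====

-- B replaces A's stateful loop by mapping octets to flags (octet != "0") and
-- checking the flag list is already sorted; objective: simpler.

-- ===== PORT A =====
-- the for-loop of A with its two state booleans; 'break' is the early 'false' return
def pvLoopA : List String → Bool → Bool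
  | [], _ => true
  | octet :: rest, last_zero =>
    let last_zero := if octet ≠ "0" && !last_zero then true else last_zero
    if octet == "0" && last_zero then false
    else pvLoopA rest last_zero

def is_wildcard_invertable (mask : String) : Bool :=
  let mask_split : List String := (PySem.Str.split? mask ".").getD []  -- sep "." ≠ "", so split? is some
  pvLoopA mask_split false

-- ===== PORT B =====
def is_wildcard_invertable_alt (mask : String) : Bool :=
  let flags : List Bool := ((PySem.Str.split? mask ".").getD []).map (fun octet => octet ≠ "0")
  flags == PySem.List.sorted flags (fun x => x) false

-- ===== PRECONDITION & SPEC =====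
def Spec_is_wildcard_invertable (mask : String) (out : Bool) : Prop := out = is_wildcard_invertable_alt mask
instance (mask : String) (out : Bool) : Decidable (Spec_is_wildcard_invertable mask out) := by unfold Spec_is_wildcard_invertable; infer_instance

-- ===== CLAIM (what is proved, stated in full; the proofs are below) =====
def Claim_equal_is_wildcard_invertable : Prop := ∀ (mask : String), Dom_is_wildcard_invertable mask → Spec_is_wildcard_invertable mask (is_wildcard_invertable mask)

-- ===== LEMMAS AND PROOFS =====

-- A's loop returns true iff (last_zero :: flags) is a ≤-chain of booleans
theorem pvLoopA_eq_chain (l : List String) (lz : Bool) :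
    pvLoopA l lz = true ↔ List.IsChain (· ≤ ·) (lz :: l.map (fun o => decide (o ≠ "0"))) := by
  induction l generalizing lz with
  | nil => simp [pvLoopA]
  | cons o rest ih =>
    by_cases h : o = "0"
    · subst h
      cases lz with
      | false =>
        simp only [pvLoopA]
        simp [ih, List.isChain_cons_cons]
      | true =>
        simp [pvLoopA, List.isChain_cons_cons]
    · simp only [pvLoopA]
      cases lz <;> simp [h, ih, List.isChain_cons_cons]

-- B returns true iff flags is a ≤-chain
theorem alt_eq_chain (flags : List Bool) :
    (flags == PySem.List.sorted flags (fun x => x) false) = true ↔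
      List.IsChain (· ≤ ·) flags := by
  constructor
  · intro hb
    have heq : flags = PySem.List.sorted flags (fun x => x) false := by simpa using hb
    have hp := PySem.List.sorted_pairwise (xs := flags) (key := fun x => x)
    rw [← heq] at hp
    exact List.isChain_iff_pairwise.mpr hp
  · intro hc
    have hp : flags.Pairwise (fun a b => a ≤ b) := List.isChain_iff_pairwise.mp hc
    have := PySem.List.sorted_eq_self_of_pairwise (xs := flags) (key := fun x => x) hp
    simp [this]

-- ===== VERDICT (by name: the statement is the Claim_ definition above) =====
theorem is_wildcard_invertable_spec : Claim_equal_is_wildcard_invertable := by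
  intro mask _
  unfold Spec_is_wildcard_invertable is_wildcard_invertable is_wildcard_invertable_alt
  rw [Bool.eq_iff_iff, pvLoopA_eq_chain, alt_eq_chain]
  rcases hl : ((PySem.Str.split? mask ".").getD []).map (fun o : String => decide (o ≠ "0")) with _ | ⟨b, t⟩
  · simp
  · rw [List.isChain_cons_cons]
    simp [Bool.false_le]
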